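-- pv_equiv track=rewrite | github.com/SoorWhy/CodingTest | 프로그래머스/1/82612. 부족한 금액 계산하기/부족한 금액 계산하기.py | solution
-- ===== SOURCE A (Python) =====
-- def solution(price, money, count):
--     answer = -1
--     total = 0
--     tmp = price
--     for i in range(1, count+1):
--         price *= i
--         total += price
--         price = tmp
--     answer = total - money
--     if answer <= 0:
--         answer = 0
--     return answer
-- ===== SOURCE B (Python) =====
-- def solution(price, money, count):
--     n = max(count, 0)
--     return max(0, price * n * (n + 1) // 2 - money)
-- ===== Notes on version B (the rewrite author's own statement) =====
-- stated objective: faster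
-- what changed: Replaces the O(count) accumulation loop by the closed-form triangular-number formula price*count*(count+1)//2, clamped to 0 with max.
import Mathlib
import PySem

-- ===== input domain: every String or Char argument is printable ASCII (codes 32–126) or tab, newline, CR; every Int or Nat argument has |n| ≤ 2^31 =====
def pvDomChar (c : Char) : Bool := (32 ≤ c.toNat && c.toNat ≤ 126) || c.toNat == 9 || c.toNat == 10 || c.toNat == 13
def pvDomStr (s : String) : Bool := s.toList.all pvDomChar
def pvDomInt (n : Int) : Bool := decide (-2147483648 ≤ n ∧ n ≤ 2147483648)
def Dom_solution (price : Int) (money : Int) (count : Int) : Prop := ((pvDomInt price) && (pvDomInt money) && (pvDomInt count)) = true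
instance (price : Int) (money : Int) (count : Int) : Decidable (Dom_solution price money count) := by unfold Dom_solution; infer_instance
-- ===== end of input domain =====

-- B replaces A's O(count) accumulation loop by the closed-form triangular-number formula (faster, asymptotic).


-- ===== PORT A =====
def solution (price : Int) (money : Int) (count : Int) : Int :=
  let answer : Int := -1
  let total : Int := 0
  let tmp := price
  let st := (PySem.List.pyRange 1 (count + 1) 1).foldl
    (fun (s : Int × Int) i =>
      let price := s.1 * i
      let total := s.2 + price
      let price := tmp
      (price, total)) (price, total)
  let answer := st.2 - money
  if answer ≤ 0 then (0 : Int) else answer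

-- ===== PORT B =====
def solution_alt (price : Int) (money : Int) (count : Int) : Int :=
  let n := max count 0
  max 0 (PySem.Int.floordiv (price * n * (n + 1)) 2 - money)

-- ===== PRECONDITION & SPEC =====
def Spec_solution (price : Int) (money : Int) (count : Int) (out : Int) : Prop := out = solution_alt price money count
instance (price : Int) (money : Int) (count : Int) (out : Int) : Decidable (Spec_solution price money count out) := by unfold Spec_solution; infer_instance

-- ===== CLAIM (what is proved, stated in full; the proofs are below) =====
def Claim_equal_solution : Prop := ∀ (price : Int) (money : Int) (count : Int), Dom_solution price money count → Spec_solution price money count (solution price money count)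

-- ===== LEMMAS AND PROOFS =====

-- A's loop keeps the (restored) price in the first state component and accumulates price * i.
lemma loopA (tmp : Int) : ∀ (n : Nat) (a total : Int),
    (PySem.List.pyRange a (a + n) 1).foldl
      (fun (s : Int × Int) i => (tmp, s.2 + s.1 * i)) (tmp, total)
    = (tmp, total + tmp * (PySem.List.pyRange a (a + n) 1).sum) := by
  intro n
  induction n with
  | zero =>
    intro a total
    rw [show a + (0 : Nat) = a by simp, PySem.List.pyRange_one_eq_nil le_rfl]
    simp
  | succ m ih =>
    intro a total
    have h : a < a + ((m : Int) + 1) := by omega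
    rw [show ((m.succ : Nat) : Int) = (m : Int) + 1 by push_cast; ring]
    rw [PySem.List.pyRange_one_cons h]
    have h2 : a + ((m : Int) + 1) = (a + 1) + (m : Int) := by ring
    simp only [List.foldl_cons, List.sum_cons, h2, ih]
    ring_nf

-- twice the sum of range(1, c+1) is c*(c+1)
lemma sum_range_two : ∀ (n : Nat),
    (PySem.List.pyRange 1 ((n : Int) + 1) 1).sum * 2 = (n : Int) * ((n : Int) + 1) := by
  intro n
  induction n with
  | zero => rw [show ((0 : Nat) : Int) + 1 = 1 by simp, PySem.List.pyRange_one_eq_nil le_rfl]; simp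
  | succ m ih =>
    have h1 : (1 : Int) ≤ (m : Int) + 1 := by omega
    rw [show ((m.succ : Nat) : Int) = (m : Int) + 1 by push_cast; ring]
    rw [PySem.List.pyRange_one_succ_right h1]
    simp only [List.sum_append, List.sum_cons, List.sum_nil]
    push_cast
    nlinarith [ih]

theorem solution_spec_aux (price money count : Int) :
    solution price money count = solution_alt price money count := by
  unfold solution solution_alt
  by_cases hc : count ≤ 0
  · -- empty loop, n = 0
    rw [PySem.List.pyRange_one_eq_nil (by omega : count + 1 ≤ 1)]
    rw [max_eq_right hc]
    simp only [List.foldl_nil]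
    have h0 : PySem.Int.floordiv (price * 0 * (0 + 1)) 2 = 0 := by
      rw [PySem.Int.floordiv_eq_ediv_of_pos (by norm_num)]; simp
    rw [h0]
    by_cases h : (0:Int) - money ≤ 0
    · simp only [if_pos h]; omega
    · simp only [if_neg h]; omega
  · rw [not_le] at hc
    -- count ≥ 1
    obtain ⟨n, hn⟩ : ∃ n : Nat, count = (n : Int) := ⟨count.toNat, by omega⟩
    subst hn
    have hfold := loopA price n 1 0
    have hsum := sum_range_two n
    rw [show (1 : Int) + (n : Int) = (n : Int) + 1 by ring] at hfold
    rw [max_eq_left (by omega : (0 : Int) ≤ (n : Int))]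
    simp only [hfold]
    set S : Int := (PySem.List.pyRange 1 ((n : Int) + 1) 1).sum with hS
    have hdiv : PySem.Int.floordiv (price * (n : Int) * ((n : Int) + 1)) 2 = price * S := by
      rw [PySem.Int.floordiv_eq_ediv_of_pos (by norm_num)]
      have : price * (n : Int) * ((n : Int) + 1) = price * S * 2 := by
        rw [mul_assoc, ← hsum]; ring
      rw [this, Int.mul_ediv_cancel _ (by norm_num)]
    rw [hdiv]
    by_cases h : 0 + price * S - money ≤ 0
    · simp only [if_pos h]; omega
    · simp only [if_neg h]; omega

-- ===== VERDICT (by name: the statement is the Claim_ definition above) =====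
theorem solution_spec : Claim_equal_solution := by
  intro price money count _
  exact solution_spec_aux price money count
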